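-- pv_equiv track=rewrite | github.com/BenPalmer1983/eampa_v3 | examples/bb1/wd/20201023_062330/input/eampa.py | split_fields
-- ===== SOURCE A (Python) =====
-- def split_fields(line, sep=" "):
--   out = line.split(sep)
--   key = out[0]
--   value = out[1]
--   value_out = ''
--   indata = False
--   for char in value:
--     if(indata and char != '"'):
--       value_out = value_out + char
--     elif(indata and char == '"'):
--       indata = False
--     elif(not indata and char == '"'):
--       indata = True
--   return key, value_out
-- ===== SOURCE B (Python) =====
-- def split_fields(line, sep=" "):
--   out = line.split(sep)
--   parts = out[1].split('"')
--   return out[0], ''.join(parts[1::2])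
-- ===== Notes on version B (the rewrite author's own statement) =====
-- stated objective: simpler
-- what changed: B replaces A's char-by-char boolean state machine over the value with a split on '"': the characters inside quote pairs are exactly the odd-indexed segments of value.split('"'), joined.
import Mathlib
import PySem

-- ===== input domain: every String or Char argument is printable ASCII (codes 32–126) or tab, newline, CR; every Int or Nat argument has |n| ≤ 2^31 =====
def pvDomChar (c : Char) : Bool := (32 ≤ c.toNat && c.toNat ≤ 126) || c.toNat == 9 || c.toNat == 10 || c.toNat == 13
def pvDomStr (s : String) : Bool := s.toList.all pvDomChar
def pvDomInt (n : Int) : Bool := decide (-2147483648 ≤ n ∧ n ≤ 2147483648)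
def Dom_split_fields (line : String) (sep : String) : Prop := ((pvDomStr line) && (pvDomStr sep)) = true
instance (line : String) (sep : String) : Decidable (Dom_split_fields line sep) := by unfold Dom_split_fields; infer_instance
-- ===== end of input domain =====

-- B replaces A's char-by-char quote state machine with split-on-'"' + join of the odd-indexed segments.
-- ===== PORT A =====
def split_fields (line : String) (sep : String) : String × String :=
  match PySem.Str.split? line sep with
  | none => ("", "")          -- ValueError: empty separator (outside Pre_)
  | some out =>
    match PySem.List.pyGet? out 0, PySem.List.pyGet? out 1 with
    | some key, some value =>
      -- for char in value: A's boolean quote state machine (value_out kept as List Char, ofList at the end)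
      let st := value.toList.foldl (fun (s : List Char × Bool) c =>
        if s.2 && !(c == '"') then (s.1 ++ [c], s.2)
        else if s.2 && (c == '"') then (s.1, false)
        else if !s.2 && (c == '"') then (s.1, true)
        else s) (([] : List Char), false)
      (key, String.ofList st.1)
    | _, _ => ("", "")        -- IndexError: fewer than two fields (outside Pre_)

-- ===== PORT B =====
def split_fields_alt (line : String) (sep : String) : String × String :=
  match PySem.Str.split? line sep with
  | none => ("", "")          -- ValueError: empty separator (outside Pre_)
  | some out =>
    match PySem.List.pyGet? out 0 with
    | none => ("", "")        -- IndexError (outside Pre_)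
    | some key =>
      match PySem.List.pyGet? out 1 with
      | none => ("", "")      -- IndexError (outside Pre_)
      | some value =>
        let parts := (PySem.Str.split? value "\"").getD []   -- '"' is nonempty, the getD never fires
        (key, PySem.Str.join "" ((PySem.List.slice? parts (some 1) none 2).getD []))  -- ''.join(parts[1::2])

-- ===== PRECONDITION & SPEC =====
-- Pre_ excludes exactly the inputs where the Python A raises: ValueError on an empty separator and
-- IndexError when line.split(sep) has fewer than two fields; B raises identically there.
def Pre_split_fields (line : String) (sep : String) : Prop :=
  sep ≠ "" ∧ 2 ≤ (PySem.Chars.splitOn line.toList sep.toList).length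
instance (line : String) (sep : String) : Decidable (Pre_split_fields line sep) := by
  unfold Pre_split_fields; infer_instance
def pvWitness_split_fields : String × String := ("k \"v\" w", " ")
def Spec_split_fields (line : String) (sep : String) (out : String × String) : Prop := out = split_fields_alt line sep
instance (line : String) (sep : String) (out : String × String) : Decidable (Spec_split_fields line sep out) := by unfold Spec_split_fields; infer_instance

-- ===== CLAIM (what is proved, stated in full; the proofs are below) =====
def Claim_equal_split_fields : Prop := ∀ (line : String) (sep : String), Dom_split_fields line sep → Pre_split_fields line sep → Spec_split_fields line sep (split_fields line sep)

-- ===== LEMMAS AND PROOFS =====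

-- clean reference forms, used only by the proofs
def pvF : List Char → Bool → List Char
  | [], _ => []
  | c :: cs, true => if c = '"' then pvF cs false else c :: pvF cs true
  | c :: cs, false => if c = '"' then pvF cs true else pvF cs false

def pvB : List Char → Bool → Bool
  | [], b => b
  | c :: cs, b => pvB cs (if c = '"' then !b else b)

def pvSplit : List Char → List Char → List (List Char)
  | [], cur => [cur.reverse]
  | c :: cs, cur => if c = '"' then cur.reverse :: pvSplit cs [] else pvSplit cs (c :: cur)

def pvOdd {α : Type} : List α → List α
  | [] => []
  | [_] => []
  | _ :: y :: r => y :: pvOdd r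

def pvStep (s : List Char × Bool) (c : Char) : List Char × Bool :=
  if s.2 && !(c == '"') then (s.1 ++ [c], s.2)
  else if s.2 && (c == '"') then (s.1, false)
  else if !s.2 && (c == '"') then (s.1, true)
  else s

theorem pvFoldl_eq (cs : List Char) (acc : List Char) (b : Bool) :
    cs.foldl (fun (s : List Char × Bool) c =>
        if s.2 && !(c == '"') then (s.1 ++ [c], s.2)
        else if s.2 && (c == '"') then (s.1, false)
        else if !s.2 && (c == '"') then (s.1, true)
        else s) (acc, b) = (acc ++ pvF cs b, pvB cs b) := by
  show List.foldl pvStep (acc, b) cs = _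
  induction cs generalizing acc b with
  | nil => simp [pvF, pvB]
  | cons c cs ih =>
    rw [List.foldl_cons]
    by_cases hc : c = '"' <;> cases b
    · have h : pvStep (acc, false) c = (acc, true) := by simp [pvStep, hc]
      rw [h, ih]; simp [pvF, pvB, hc]
    · have h : pvStep (acc, true) c = (acc, false) := by simp [pvStep, hc]
      rw [h, ih]; simp [pvF, pvB, hc]
    · have h : pvStep (acc, false) c = (acc, false) := by simp [pvStep, hc]
      rw [h, ih]; simp [pvF, pvB, hc]
    · have h : pvStep (acc, true) c = (acc ++ [c], true) := by simp [pvStep, hc]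
      rw [h, ih]; simp [pvF, pvB, hc]

theorem pvGo_eq (fuel : Nat) (l cur : List Char) (acc : List (List Char))
    (h : l.length < fuel) :
    PySem.Chars.splitOn.go ['"'] fuel l cur acc = acc.reverse ++ pvSplit l cur := by
  induction fuel generalizing l cur acc with
  | zero => omega
  | succ n ih =>
    cases l with
    | nil => simp [PySem.Chars.splitOn.go, pvSplit]
    | cons c rest =>
      by_cases hc : c = '"'
      · subst hc
        rw [PySem.Chars.splitOn.go]
        simp only [List.isPrefixOf] at *
        simp [ih rest [] (cur.reverse :: acc) (by simp at h ⊢; omega), pvSplit]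
      · rw [PySem.Chars.splitOn.go]
        have : ['"'].isPrefixOf (c :: rest) = false := by
          simp only [List.isPrefixOf, Bool.and_true, beq_eq_false_iff_ne]
          exact fun h => hc h.symm
        simp [this, ih rest (c :: cur) acc (by simp at h ⊢; omega), pvSplit, hc]

theorem pvOdd_flatten (cs : List Char) :
    (∀ cur, (pvOdd (pvSplit cs cur)).flatten = pvF cs false) ∧
    (∀ cur x, (pvOdd ((x : List Char) :: pvSplit cs cur)).flatten = cur.reverse ++ pvF cs true) := by
  induction cs with
  | nil => simp [pvSplit, pvOdd, pvF]
  | cons c rest ih =>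
    by_cases hc : c = '"'
    · constructor
      · intro cur
        simp only [pvSplit, hc]
        have := ih.2 [] cur.reverse
        simpa [pvF, hc] using this
      · intro cur x
        simp only [pvSplit, hc]
        simp [pvOdd, pvF, ih.1 []]
    · constructor
      · intro cur
        simp [pvSplit, hc, pvF, ih.1 (c :: cur)]
      · intro cur x
        have := ih.2 (c :: cur) x
        simp only [pvSplit, if_neg hc]
        simp [pvF, hc, this, List.append_assoc]

theorem pvOdd_eq_filterMap {α : Type} (xs : List α) :
    pvOdd xs = List.filterMap (fun k : Nat => xs[(1 + 2 * (k : Int)).toNat]?) (List.range (xs.length / 2)) := by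
  induction xs using pvOdd.induct with
  | case1 => simp [pvOdd]
  | case2 x => simp [pvOdd]
  | case3 x y r ih =>
    have hlen : (x :: y :: r).length / 2 = r.length / 2 + 1 := by simp only [List.length_cons]; omega
    rw [hlen, List.range_succ_eq_map]
    simp only [List.filterMap_cons, List.filterMap_map]
    have h0 : ((x :: y :: r))[(1 + 2 * ((0 : Nat) : Int)).toNat]? = some y := by norm_num
    rw [h0]
    simp only [pvOdd, List.cons.injEq, true_and, ih, Function.comp_def]
    apply List.filterMap_congr
    intro k _
    rw [show ((1 : Int) + 2 * ((k.succ : Nat) : Int)).toNat = (2 * k + 1) + 1 + 1 from by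
          simp only [Nat.succ_eq_add_one]; omega,
        show ((1 : Int) + 2 * (k : Int)).toNat = 2 * k + 1 from by omega]
    simp [List.getElem?_cons_succ]

theorem pvSlice_odd {α : Type} (xs : List α) :
    PySem.List.slice? xs (some 1) none 2 = some (pvOdd xs) := by
  rw [PySem.List.slice?]
  cases xs with
  | nil => simp [PySem.List.sliceIndices, pvOdd]
  | cons a r =>
    simp only [PySem.List.sliceIndices]
    norm_num
    rw [pvOdd_eq_filterMap]
    have hcount : (if 0 < r.length then (((r.length : Int) + 2 - 1) / 2).toNat else 0)
        = (a :: r).length / 2 := by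
      split_ifs with h <;> simp only [List.length_cons] <;> omega
    rw [hcount]

theorem pvOdd_map {α β : Type} (f : α → β) (xs : List α) :
    pvOdd (xs.map f) = (pvOdd xs).map f := by
  induction xs using pvOdd.induct <;> simp_all [pvOdd]

theorem pvIntercalate_nil {α : Type} (L : List (List α)) :
    ([] : List α).intercalate L = L.flatten := by
  induction L with
  | nil => rfl
  | cons x r ih => cases r <;> simp_all [List.intercalate, List.intersperse]

-- ===== VERDICT (by name: the statement is the Claim_ definition above) =====
theorem split_fields_spec : Claim_equal_split_fields := by
  intro line sep _ hpre
  obtain ⟨hsep, hlen⟩ := hpre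
  unfold Spec_split_fields split_fields split_fields_alt
  have hne : sep.toList.isEmpty = false := by
    simp [List.isEmpty_eq_false_iff, hsep]
  have hsplit : PySem.Str.split? line sep
      = some ((PySem.Chars.splitOn line.toList sep.toList).map String.ofList) := by
    simp [PySem.Str.split?, PySem.Chars.split?, hne]
  obtain ⟨l0, l1, rest, hform⟩ :
      ∃ l0 l1 rest, PySem.Chars.splitOn line.toList sep.toList = l0 :: l1 :: rest := by
    rcases h : PySem.Chars.splitOn line.toList sep.toList with _ | ⟨a, _ | ⟨b, t⟩⟩ <;>
      simp_all
  rw [hform] at hsplit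
  simp only [hsplit]
  have hg0 : PySem.List.pyGet? ((l0 :: l1 :: rest).map String.ofList) 0
      = some (String.ofList l0) := by
    have := PySem.List.pyGet?_natCast ((l0 :: l1 :: rest).map String.ofList) 0
    simp_all
  have hg1 : PySem.List.pyGet? ((l0 :: l1 :: rest).map String.ofList) 1
      = some (String.ofList l1) := by
    have := PySem.List.pyGet?_natCast ((l0 :: l1 :: rest).map String.ofList) 1
    simp_all
  simp only [hg0, hg1]
  -- both sides: key = ofList l0; compare the value components
  have hval : (String.ofList l1).toList = l1 := by simp
  rw [hval, pvFoldl_eq]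
  -- B's inner split of the value on '"'
  have hsplit1 : PySem.Str.split? (String.ofList l1) "\""
      = some ((PySem.Chars.splitOn l1 ['"']).map String.ofList) := by
    simp [PySem.Str.split?, PySem.Chars.split?]
  have hgo : PySem.Chars.splitOn l1 ['"'] = pvSplit l1 [] := by
    rw [PySem.Chars.splitOn]
    have := pvGo_eq (l1.length + 1) l1 [] [] (by omega)
    simpa using this
  rw [hsplit1]
  simp only [Option.getD_some]
  rw [hgo, pvSlice_odd, Option.getD_some, pvOdd_map]
  have hjoin : PySem.Str.join "" ((pvOdd (pvSplit l1 [])).map String.ofList)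
      = String.ofList (pvOdd (pvSplit l1 [])).flatten := by
    simp [PySem.Str.join, PySem.Chars.join, List.map_map, Function.comp_def,
      pvIntercalate_nil]
  rw [hjoin, (pvOdd_flatten l1).1 []]
  simp
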